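-- pv_equiv track=rewrite | github.com/crate/cratedb-toolkit | cratedb_toolkit/cfr/jobstats.py | assign_to_bucket
-- ===== SOURCE A (Python) =====
-- bucket_list = [10, 50, 100, 500, 1000, 2000, 5000, 10000, 15000, 20000]
--
-- def assign_to_bucket(bucket, duration):
--     found = False
--     for element in bucket_list:
--         if duration < element:
--             found = True
--             bucket[str(element)] += 1
--             break
--     if not found:
--         bucket["INF"] += 1
--
--     return bucket
-- ===== SOURCE B (Python) =====
-- bucket_list = [10, 50, 100, 500, 1000, 2000, 5000, 10000, 15000, 20000]
--
-- def assign_to_bucket(bucket, duration):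
--     # Binary search for the first boundary strictly greater than duration
--     # (same result as the linear scan: bisect_right semantics for strict '<').
--     lo, hi = 0, len(bucket_list)
--     while lo < hi:
--         mid = (lo + hi) // 2
--         if duration < bucket_list[mid]:
--             hi = mid
--         else:
--             lo = mid + 1
--     key = str(bucket_list[lo]) if lo < len(bucket_list) else "INF"
--     bucket[key] += 1
--     return bucket
-- ===== Notes on version B (the rewrite author's own statement) =====
-- stated objective: alternative
-- what changed: Replaces A's linear first-match scan over the boundary list (with a found flag and break) by a hand-written bisect_right-style binary search that computes the bucket index, then does a single keyed increment.
import Mathlib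
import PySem

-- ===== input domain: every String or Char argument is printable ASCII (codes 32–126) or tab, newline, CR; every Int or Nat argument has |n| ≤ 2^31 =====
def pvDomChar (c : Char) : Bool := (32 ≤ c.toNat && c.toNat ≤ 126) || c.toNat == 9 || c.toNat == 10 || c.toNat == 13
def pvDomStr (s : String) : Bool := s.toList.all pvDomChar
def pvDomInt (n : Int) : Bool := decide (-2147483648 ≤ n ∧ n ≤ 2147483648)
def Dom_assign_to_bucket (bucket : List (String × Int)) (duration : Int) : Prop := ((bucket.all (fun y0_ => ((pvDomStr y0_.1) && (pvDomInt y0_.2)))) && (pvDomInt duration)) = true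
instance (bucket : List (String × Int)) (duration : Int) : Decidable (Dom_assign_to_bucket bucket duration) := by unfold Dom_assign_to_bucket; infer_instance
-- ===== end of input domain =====

-- B replaces A's linear scan over the boundary list by a hand-written binary search
-- (bisect_right semantics); both mutate the given dict in place in Python, and the
-- equivalence proved here is about the returned association list.

-- ===== PORT A =====
-- the module constant bucket_list (shared by both versions in Python)
def bucketListConst : List Int := [10, 50, 100, 500, 1000, 2000, 5000, 10000, 15000, 20000]

-- the for-loop with its `found` flag and `break`: first element with duration < element
def assignLoopA (l : List Int) (d : PySem.Dict String Int) (duration : Int) : PySem.Dict String Int :=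
  match l with
  | [] => d.modify "INF" 0 (· + 1)          -- `if not found: bucket["INF"] += 1`
  | e :: rest =>
      if duration < e then d.modify (PySem.Int.toStr e) 0 (· + 1)
      else assignLoopA rest d duration

def assign_to_bucket (bucket : List (String × Int)) (duration : Int) : List (String × Int) :=
  (assignLoopA bucketListConst (PySem.Dict.mk bucket) duration).items

-- ===== PORT B =====
-- the while-loop `while lo < hi: …` of Source B (terminates since hi - lo shrinks)
def bsearchB (duration : Int) (lo hi : Nat) : Nat :=
  if lo < hi then
    let mid := (lo + hi) / 2
    -- bucket_list[mid]: mid < hi ≤ len(bucket_list) always, so the index is in range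
    if duration < bucketListConst.getD mid 0 then bsearchB duration lo mid
    else bsearchB duration (mid + 1) hi
  else lo
termination_by hi - lo
decreasing_by all_goals omega

def assign_to_bucket_alt (bucket : List (String × Int)) (duration : Int) : List (String × Int) :=
  let lo := bsearchB duration 0 bucketListConst.length
  let key := if lo < bucketListConst.length then PySem.Int.toStr (bucketListConst.getD lo 0) else "INF"
  ((PySem.Dict.mk bucket).modify key 0 (· + 1)).items

-- ===== PRECONDITION & SPEC =====
-- the histogram label that duration falls into (closed-form piecewise condition)
def labelFor (d : Int) : String :=
  if d < 10 then "10" else if d < 50 then "50" else if d < 100 then "100"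
  else if d < 500 then "500" else if d < 1000 then "1000" else if d < 2000 then "2000"
  else if d < 5000 then "5000" else if d < 10000 then "10000" else if d < 15000 then "15000"
  else if d < 20000 then "20000" else "INF"

-- Pre_ excludes exactly the inputs where Python A raises KeyError: the bucket dict
-- must already carry the key that duration's bucket label selects.
def Pre_assign_to_bucket (bucket : List (String × Int)) (duration : Int) : Prop :=
  (bucket.map Prod.fst).contains (labelFor duration) = true
instance (bucket : List (String × Int)) (duration : Int) : Decidable (Pre_assign_to_bucket bucket duration) := by unfold Pre_assign_to_bucket; infer_instance

def pvWitness_assign_to_bucket : (List (String × Int)) × Int := ([("10", 0), ("INF", 2)], 3)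

def Spec_assign_to_bucket (bucket : List (String × Int)) (duration : Int) (out : List (String × Int)) : Prop := out = assign_to_bucket_alt bucket duration
instance (bucket : List (String × Int)) (duration : Int) (out : List (String × Int)) : Decidable (Spec_assign_to_bucket bucket duration out) := by unfold Spec_assign_to_bucket; infer_instance

-- ===== CLAIM (what is proved, stated in full; the proofs are below) =====
def Claim_equal_assign_to_bucket : Prop := ∀ (bucket : List (String × Int)) (duration : Int), Dom_assign_to_bucket bucket duration → Pre_assign_to_bucket bucket duration → Spec_assign_to_bucket bucket duration (assign_to_bucket bucket duration)

-- ===== LEMMAS AND PROOFS =====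

theorem toStr_consts :
    PySem.Int.toStr 10 = "10" ∧ PySem.Int.toStr 50 = "50" ∧ PySem.Int.toStr 100 = "100" ∧
    PySem.Int.toStr 500 = "500" ∧ PySem.Int.toStr 1000 = "1000" ∧ PySem.Int.toStr 2000 = "2000" ∧
    PySem.Int.toStr 5000 = "5000" ∧ PySem.Int.toStr 10000 = "10000" ∧
    PySem.Int.toStr 15000 = "15000" ∧ PySem.Int.toStr 20000 = "20000" := by decide

-- A's loop picks exactly the label of duration's bucket
set_option maxHeartbeats 2000000 in
theorem loopA_eq_label (d : PySem.Dict String Int) (x : Int) :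
    assignLoopA bucketListConst d x = d.modify (labelFor x) 0 (· + 1) := by
  obtain ⟨t1, t2, t3, t4, t5, t6, t7, t8, t9, t10⟩ := toStr_consts
  simp only [bucketListConst, assignLoopA, labelFor, t1, t2, t3, t4, t5, t6, t7, t8, t9, t10]
  split_ifs <;> rfl

-- B's binary search picks the same label
theorem bsearchB_eq_label (x : Int) :
    (if bsearchB x 0 bucketListConst.length < bucketListConst.length then
        PySem.Int.toStr (bucketListConst.getD (bsearchB x 0 bucketListConst.length) 0)
      else "INF") = labelFor x := by
  obtain ⟨t1, t2, t3, t4, t5, t6, t7, t8, t9, t10⟩ := toStr_consts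
  by_cases h1 : x < 10 <;> by_cases h2 : x < 50 <;> by_cases h3 : x < 100 <;>
  by_cases h4 : x < 500 <;> by_cases h5 : x < 1000 <;> by_cases h6 : x < 2000 <;>
  by_cases h7 : x < 5000 <;> by_cases h8 : x < 10000 <;> by_cases h9 : x < 15000 <;>
  by_cases h10 : x < 20000 <;>
  first
  | omega
  | simp [bsearchB.eq_def, bucketListConst, labelFor,
      h1, h2, h3, h4, h5, h6, h7, h8, h9, h10, t1, t2, t3, t4, t5, t6, t7, t8, t9, t10]

-- ===== VERDICT =====
theorem assign_to_bucket_spec : Claim_equal_assign_to_bucket := by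
  intro bucket duration _ _
  unfold Spec_assign_to_bucket assign_to_bucket assign_to_bucket_alt
  simp only [loopA_eq_label, bsearchB_eq_label]
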